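-- pv_equiv track=rewrite | github.com/smc5720/Programmers | 크레인 인형뽑기 게임.py | solution
-- ===== SOURCE A (Python) =====
-- def solution(board, moves):
--     stack = []
--     field = [[] for _ in range(len(board))]
--     answer = 0
--
--     for i in range(len(board) - 1, -1, -1):
--         for j in range(len(board)):
--             if board[i][j] != 0:
--                 field[j].append(board[i][j])
--
--     for i in moves:
--         tmp = i - 1
--         if field[tmp]:
--             cur_block = field[tmp].pop()
--             if stack and stack[-1] == cur_block:
--                 stack.pop()
--                 answer += 2
--             else:
--                 stack.append(cur_block)
--
--     return answer
-- ===== SOURCE B (Python) =====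
-- def solution(board, moves):
--     n = len(board)
--     ptr = [0] * n
--     stack = []
--     answer = 0
--     for m in moves:
--         c = m - 1
--         p = ptr[c]
--         while p < n and board[p][c] == 0:
--             p += 1
--         if p < n:
--             cur = board[p][c]
--             ptr[c] = p + 1
--             if stack and stack[-1] == cur:
--                 stack.pop()
--                 answer += 2
--             else:
--                 stack.append(cur)
--     return answer
-- ===== Notes on version B (the rewrite author's own statement) =====
-- stated objective: simpler
-- what changed: B drops A's whole O(n^2) build-the-per-column-stacks preprocessing pass: it keeps one next-row pointer per column and lazily scans the column top-down past zeros during each move; the result-stack/answer matching logic is unchanged.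
-- outside the precondition, e.g. on solution([[1, 2, 9], [1, 2, 9]], [0, 2]): A returns 2, B returns 0; on solution([[1]], [2]): A raises IndexError, B raises IndexError
import Mathlib
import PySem

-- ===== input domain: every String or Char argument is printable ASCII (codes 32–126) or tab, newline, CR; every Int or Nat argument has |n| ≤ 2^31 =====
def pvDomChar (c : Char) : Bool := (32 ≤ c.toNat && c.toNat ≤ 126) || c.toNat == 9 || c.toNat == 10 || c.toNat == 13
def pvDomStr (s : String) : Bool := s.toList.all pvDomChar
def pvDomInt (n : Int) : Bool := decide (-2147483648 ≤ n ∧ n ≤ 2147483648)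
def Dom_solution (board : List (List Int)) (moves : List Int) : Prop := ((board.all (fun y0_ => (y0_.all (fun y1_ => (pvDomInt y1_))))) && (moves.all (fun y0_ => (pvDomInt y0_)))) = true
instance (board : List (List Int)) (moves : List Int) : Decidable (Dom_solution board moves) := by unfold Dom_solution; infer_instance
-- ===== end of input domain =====

-- B drops A's board-preprocessing pass (building per-column pop stacks) in favour of lazy
-- per-column top pointers advanced during the moves themselves; same matching logic and value.

-- ===== PORT A =====
-- inner loop 'for j in range(len(board)): if board[i][j] != 0: field[j].append(board[i][j])'
def buildInner (board : List (List Int)) (n : Int) (f : List (List Int)) (i : Int) : List (List Int) :=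
  (PySem.List.pyRange 0 n 1).foldl (fun f j =>
    if PySem.List.pyGetD (PySem.List.pyGetD board i []) j 0 ≠ 0 then
      PySem.List.pySetD f j
        (PySem.List.pyGetD f j [] ++ [PySem.List.pyGetD (PySem.List.pyGetD board i []) j 0])
    else f) f

-- 'for i in range(len(board)-1, -1, -1): <inner loop>'
def buildField (board : List (List Int)) : List (List Int) :=
  (PySem.List.pyRange ((board.length : Int) - 1) (-1) (-1)).foldl
    (buildInner board board.length) (List.replicate board.length ([] : List Int))

-- one iteration of A's moves loop on state (field, stack, answer)
def stepA (s : List (List Int) × List Int × Int) (i : Int) : List (List Int) × List Int × Int :=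
  let tmp := i - 1
  let fl := PySem.List.pyGetD s.1 tmp []
  if fl ≠ [] then
    let cur := PySem.List.pyGetD fl (-1) 0          -- fl.pop(): last element …
    let f' := PySem.List.pySetD s.1 tmp fl.dropLast -- … and the list without it
    if s.2.1 ≠ [] ∧ PySem.List.pyGetD s.2.1 (-1) 0 = cur then
      (f', s.2.1.dropLast, s.2.2 + 2)
    else (f', s.2.1 ++ [cur], s.2.2)
  else s

def solution (board : List (List Int)) (moves : List Int) : Int :=
  (moves.foldl stepA (buildField board, ([] : List Int), (0 : Int))).2.2

-- ===== PORT B =====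
-- the 'while p < n and board[p][c] == 0: p += 1' loop, exact for fuel ≥ n - p
def findNZ (board : List (List Int)) (n c : Int) : Nat → Int → Int
  | 0, p => p
  | fuel + 1, p =>
    if p < n ∧ PySem.List.pyGetD (PySem.List.pyGetD board p []) c 0 = 0 then
      findNZ board n c fuel (p + 1)
    else p

-- one iteration of B's moves loop on state (ptr, stack, answer)
def stepB (board : List (List Int)) (s : List Int × List Int × Int) (m : Int) :
    List Int × List Int × Int :=
  let c := m - 1
  let p := findNZ board board.length c board.length (PySem.List.pyGetD s.1 c 0)
  if p < (board.length : Int) then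
    let cur := PySem.List.pyGetD (PySem.List.pyGetD board p []) c 0
    let ptr' := PySem.List.pySetD s.1 c (p + 1)
    if s.2.1 ≠ [] ∧ PySem.List.pyGetD s.2.1 (-1) 0 = cur then
      (ptr', s.2.1.dropLast, s.2.2 + 2)
    else (ptr', s.2.1 ++ [cur], s.2.2)
  else s

def solution_alt (board : List (List Int)) (moves : List Int) : Int :=
  (moves.foldl (stepB board)
    (List.replicate board.length (0 : Int), ([] : List Int), (0 : Int))).2.2

-- ===== PRECONDITION & SPEC =====
-- Pre_ excludes inputs on which A raises IndexError (a row shorter than len(board), a move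
-- outside [1-n, n]) and boards with over-long rows combined with a non-positive (wrapping) move,
-- where A's negative index wraps in its n-column field while B's wraps in the longer row —
-- a shape/corner combination nobody specifies (see cites).
def Pre_solution (board : List (List Int)) (moves : List Int) : Prop :=
  (∀ row ∈ board, board.length ≤ row.length) ∧
  (∀ m ∈ moves, 1 - (board.length : Int) ≤ m ∧ m ≤ (board.length : Int)) ∧
  ((∀ row ∈ board, row.length = board.length) ∨ (∀ m ∈ moves, 1 ≤ m))
instance (board : List (List Int)) (moves : List Int) : Decidable (Pre_solution board moves) := by
  unfold Pre_solution; infer_instance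

def pvWitness_solution : List (List Int) × List Int :=
  ([[0, 0, 1], [0, 2, 1], [2, 3, 3]], [1, 2, 3, 3, 2, 0])

def Spec_solution (board : List (List Int)) (moves : List Int) (out : Int) : Prop := out = solution_alt board moves
instance (board : List (List Int)) (moves : List Int) (out : Int) : Decidable (Spec_solution board moves out) := by unfold Spec_solution; infer_instance

-- ===== CLAIM (what is proved, stated in full; the proofs are below) =====
def Claim_equal_solution : Prop := ∀ (board : List (List Int)) (moves : List Int), Dom_solution board moves → Pre_solution board moves → Spec_solution board moves (solution board moves)

-- ===== LEMMAS AND PROOFS =====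

def wrapIdx (n : Nat) (i : Int) : Nat := if 0 ≤ i then i.toNat else n - (-i).toNat

theorem pyIdx?_inRange (n : Nat) (i : Int) (h1 : -(n : Int) ≤ i) (h2 : i < n) :
    PySem.List.pyIdx? n i = some (wrapIdx n i) := by
  unfold PySem.List.pyIdx? wrapIdx
  split_ifs <;> first | rfl | omega

theorem pyGetD_wrap {α : Type} (xs : List α) (i : Int) (d : α)
    (h1 : -(xs.length : Int) ≤ i) (h2 : i < xs.length) :
    PySem.List.pyGetD xs i d = xs.getD (wrapIdx xs.length i) d := by
  simp [PySem.List.pyGetD, PySem.List.pyGet?, pyIdx?_inRange _ _ h1 h2, List.getD]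

theorem pySetD_wrap {α : Type} (xs : List α) (i : Int) (v : α)
    (h1 : -(xs.length : Int) ≤ i) (h2 : i < xs.length) :
    PySem.List.pySetD xs i v = xs.set (wrapIdx xs.length i) v := by
  simp [PySem.List.pySetD, PySem.List.pySet?, pyIdx?_inRange _ _ h1 h2]

theorem buildInner_gen (r : List Int) (n : Nat) (hr : n ≤ r.length) :
    ∀ (dd : Nat) (a : Int) (f : List (List Int)), 0 ≤ a → dd = ((n : Int) - a).toNat →
      f.length = n →
      (((PySem.List.pyRange a n 1).foldl (fun f j =>
        if PySem.List.pyGetD r j 0 ≠ 0 then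
          PySem.List.pySetD f j (PySem.List.pyGetD f j [] ++ [PySem.List.pyGetD r j 0])
        else f) f).length = n ∧
      ∀ k, k < n →
        ((PySem.List.pyRange a n 1).foldl (fun f j =>
          if PySem.List.pyGetD r j 0 ≠ 0 then
            PySem.List.pySetD f j (PySem.List.pyGetD f j [] ++ [PySem.List.pyGetD r j 0])
          else f) f).getD k [] =
          f.getD k [] ++ (if a ≤ (k : Int) ∧ r.getD k 0 ≠ 0 then [r.getD k 0] else [])) := by
  intro dd
  induction dd with
  | zero =>
    intro a f ha hdd hf
    rw [PySem.List.pyRange_one_eq_nil (by omega)]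
    refine ⟨hf, ?_⟩
    intro k hk
    rw [if_neg (by push_cast; omega)]
    simp
  | succ d ih =>
    intro a f ha hdd hf
    have han : a < (n : Int) := by omega
    rw [PySem.List.pyRange_one_cons han]
    simp only [List.foldl_cons]
    have hga : PySem.List.pyGetD r a 0 = r.getD a.toNat 0 := by
      rw [pyGetD_wrap r a 0 (by omega) (by omega), wrapIdx, if_pos ha]
    rw [hga]
    have hwa : wrapIdx f.length a = a.toNat := by rw [wrapIdx, if_pos ha]
    by_cases hz : r.getD a.toNat 0 = 0
    · rw [if_neg (by simpa [List.getD] using hz)]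
      obtain ⟨hl, hk⟩ := ih (a + 1) f (by omega) (by omega) hf
      refine ⟨hl, ?_⟩
      intro k hkn
      rw [hk k hkn]
      by_cases hka : (k : Int) = a
      · have hz' : r.getD k 0 = 0 := by rw [(by omega : k = a.toNat)]; exact hz
        have hz2 : r[k]?.getD 0 = 0 := by simpa [List.getD] using hz'
        rw [if_neg (by simp [List.getD, hz2]), if_neg (by simp [List.getD, hz2])]
      · congr 1
        have hiff : ((a + 1) ≤ (k : Int)) ↔ (a ≤ (k : Int)) := by omega
        simp [hiff]
    · rw [if_pos (by simpa [List.getD] using hz)]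
      rw [pyGetD_wrap f a [] (by omega) (by omega), pySetD_wrap f a _ (by omega) (by omega), hwa]
      set f' := f.set a.toNat (f.getD a.toNat [] ++ [r.getD a.toNat 0]) with hf'def
      have hf' : f'.length = n := by simp [hf'def, hf]
      obtain ⟨hl, hk⟩ := ih (a + 1) f' (by omega) (by omega) hf'
      refine ⟨hl, ?_⟩
      intro k hkn
      rw [hk k hkn]
      by_cases hka : (k : Int) = a
      · have hke : k = a.toNat := by omega
        have hset : f'.getD k [] = f.getD k [] ++ [r.getD k 0] := by
          rw [hf'def, hke]
          have hlt : a.toNat < f.length := by omega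
          simp [List.getD, hlt]
        rw [hset, if_neg (by push_cast; omega), if_pos ⟨by omega, by rw [hke]; exact hz⟩]
        simp
      · have hset : f'.getD k [] = f.getD k [] := by
          rw [hf'def]
          simp [List.getD, List.getElem?_set_ne (by omega : a.toNat ≠ k)]
        rw [hset]
        congr 1
        have : ((a + 1) ≤ (k : Int)) ↔ (a ≤ (k : Int)) := by omega
        simp [this]

def col (board : List (List Int)) (k : Nat) : List Int := board.map (fun r => r.getD k 0)

theorem col_getD (board : List (List Int)) (k i : Nat) :
    (col board k).getD i 0 = (board.getD i []).getD k 0 := by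
  simp only [col, List.getD, List.getElem?_map]
  cases board[i]? <;> simp [List.getD]

theorem length_col (board : List (List Int)) (k : Nat) :
    (col board k).length = board.length := by simp [col]

theorem buildInner_spec (board : List (List Int))
    (hPre : ∀ row ∈ board, board.length ≤ row.length)
    (i : Int) (hi0 : 0 ≤ i) (hi2 : i < board.length)
    (f : List (List Int)) (hf : f.length = board.length) :
    (buildInner board board.length f i).length = board.length ∧
    ∀ k, k < board.length →
      (buildInner board board.length f i).getD k [] =
        f.getD k [] ++ (if (board.getD i.toNat []).getD k 0 ≠ 0
          then [(board.getD i.toNat []).getD k 0] else []) := by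
  have hgb : PySem.List.pyGetD board i [] = board.getD i.toNat [] := by
    rw [pyGetD_wrap board i [] (by omega) hi2, wrapIdx, if_pos hi0]
  have hmem : board.getD i.toNat [] ∈ board := by
    have hlt : i.toNat < board.length := by omega
    rw [List.getD_eq_getElem _ _ hlt]
    exact List.getElem_mem hlt
  have hr : board.length ≤ (board.getD i.toNat []).length := hPre _ hmem
  unfold buildInner
  rw [hgb]
  obtain ⟨hl, hk⟩ := buildInner_gen (board.getD i.toNat []) board.length hr
    board.length 0 f (by omega) (by omega) hf
  refine ⟨hl, ?_⟩
  intro k hkn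
  rw [hk k hkn]
  congr 1
  simp

theorem buildField_gen (board : List (List Int))
    (hPre : ∀ row ∈ board, board.length ≤ row.length) :
    ∀ (t : Nat), t ≤ board.length → ∀ (f : List (List Int)), f.length = board.length →
      (((PySem.List.pyRange ((t : Int) - 1) (-1) (-1)).foldl
          (buildInner board board.length) f).length = board.length ∧
      ∀ k, k < board.length →
        ((PySem.List.pyRange ((t : Int) - 1) (-1) (-1)).foldl
          (buildInner board board.length) f).getD k [] =
          f.getD k [] ++ (((col board k).take t).filter (· ≠ 0)).reverse) := by
  intro t
  induction t with
  | zero =>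
    intro _ f hf
    rw [show ((0 : Nat) : Int) - 1 = -1 by norm_num, PySem.List.pyRange_neg_one_eq_nil le_rfl]
    refine ⟨hf, ?_⟩
    intro k hk
    simp
  | succ t ih =>
    intro ht f hf
    have hcast : ((t : Int) + 1 - 1) = (t : Int) := by omega
    have hcons : PySem.List.pyRange ((((t + 1) : Nat) : Int) - 1) (-1) (-1) =
        (t : Int) :: PySem.List.pyRange ((t : Int) - 1) (-1) (-1) := by
      push_cast
      rw [hcast, PySem.List.pyRange_neg_one_cons (by omega)]
    rw [hcons]
    simp only [List.foldl_cons]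
    obtain ⟨hl1, hk1⟩ := buildInner_spec board hPre (t : Int) (by omega) (by omega) f hf
    obtain ⟨hl2, hk2⟩ := ih (by omega) _ hl1
    refine ⟨hl2, ?_⟩
    intro k hkn
    rw [hk2 k hkn, hk1 k hkn]
    have htl : t < (col board k).length := by rw [length_col]; omega
    have hval : (col board k)[t]? = some ((board.getD t []).getD k 0) := by
      rw [List.getElem?_eq_getElem htl]
      have := col_getD board k t
      rw [List.getD_eq_getElem _ _ htl] at this
      rw [this]
    rw [List.take_add_one, hval]
    simp only [Option.toList_some, Int.toNat_natCast, List.filter_append,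
      List.reverse_append, List.append_assoc]
    congr 1
    by_cases hv : (board.getD t []).getD k 0 = 0
    · simp only [List.getD] at hv
      simp [hv]
    · simp only [List.getD] at hv
      simp [hv]

theorem buildField_spec (board : List (List Int))
    (hPre : ∀ row ∈ board, board.length ≤ row.length) :
    (buildField board).length = board.length ∧
    ∀ k, k < board.length →
      (buildField board).getD k [] = ((col board k).filter (· ≠ 0)).reverse := by
  obtain ⟨hl, hk⟩ := buildField_gen board hPre board.length le_rfl
    (List.replicate board.length []) (by simp)
  unfold buildField
  refine ⟨hl, ?_⟩
  intro k hkn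
  rw [hk k hkn]
  have h0 : (List.replicate board.length ([] : List Int)).getD k [] = [] := by
    simp [List.getD]
  have ht : (col board k).take board.length = col board k := by
    rw [← length_col board k, List.take_length]
  rw [h0, ht]
  simp

def firstNZ : List Int → Nat
  | [] => 0
  | x :: xs => if x = 0 then firstNZ xs + 1 else 0

theorem cell_eq (board : List (List Int))
    (hPre : ∀ row ∈ board, board.length ≤ row.length) (c p : Int)
    (hex : 0 ≤ c ∨ ∀ row ∈ board, row.length = board.length)
    (hc1 : -(board.length : Int) ≤ c) (hc2 : c < board.length)
    (hp0 : 0 ≤ p) (hp1 : p < board.length) :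
    PySem.List.pyGetD (PySem.List.pyGetD board p []) c 0 =
      (col board (wrapIdx board.length c)).getD p.toNat 0 := by
  have hplt : p.toNat < board.length := by omega
  have hrow : PySem.List.pyGetD board p [] = board.getD p.toNat [] := by
    rw [pyGetD_wrap board p [] (by omega) (by omega), wrapIdx, if_pos hp0]
  have hmem : board.getD p.toNat [] ∈ board := by
    rw [List.getD_eq_getElem _ _ hplt]; exact List.getElem_mem hplt
  have hrl : board.length ≤ (board.getD p.toNat []).length := hPre _ hmem
  have hw : wrapIdx (board.getD p.toNat []).length c = wrapIdx board.length c := by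
    rcases hex with hc0 | hexact
    · unfold wrapIdx; rw [if_pos hc0, if_pos hc0]
    · rw [hexact _ hmem]
  rw [hrow, pyGetD_wrap _ c 0 (by omega) (by omega), hw, col_getD]

theorem findNZ_eq (board : List (List Int))
    (hPre : ∀ row ∈ board, board.length ≤ row.length) (c : Int)
    (hex : 0 ≤ c ∨ ∀ row ∈ board, row.length = board.length)
    (hc1 : -(board.length : Int) ≤ c) (hc2 : c < board.length) :
    ∀ (fuel : Nat) (p : Int), 0 ≤ p → p ≤ board.length →
      (board.length : Int) - p ≤ fuel →
      findNZ board board.length c fuel p =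
        p + firstNZ ((col board (wrapIdx board.length c)).drop p.toNat) := by
  intro fuel
  induction fuel with
  | zero =>
    intro p hp0 hpn hfu
    have hpe : p.toNat = board.length := by omega
    rw [show findNZ board board.length c 0 p = p from rfl]
    rw [List.drop_of_length_le (by rw [length_col]; omega)]
    simp [firstNZ]
  | succ fuel ih =>
    intro p hp0 hpn hfu
    by_cases hpn' : p < (board.length : Int)
    · have hplt : p.toNat < board.length := by omega
      have hcell : PySem.List.pyGetD (PySem.List.pyGetD board p []) c 0 =
          (col board (wrapIdx board.length c)).getD p.toNat 0 :=
        cell_eq board hPre c p hex hc1 hc2 hp0 hpn'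
      have hdrop : (col board (wrapIdx board.length c)).drop p.toNat =
          (col board (wrapIdx board.length c)).getD p.toNat 0 ::
          (col board (wrapIdx board.length c)).drop (p.toNat + 1) := by
        have hlt : p.toNat < (col board (wrapIdx board.length c)).length := by
          rw [length_col]; omega
        rw [List.drop_eq_getElem_cons hlt, List.getD_eq_getElem _ _ hlt]
      rw [show findNZ board board.length c (fuel + 1) p =
        (if p < (board.length : Int) ∧
            PySem.List.pyGetD (PySem.List.pyGetD board p []) c 0 = 0 then
          findNZ board board.length c fuel (p + 1)
        else p) from rfl]
      rw [hcell]
      by_cases hz : (col board (wrapIdx board.length c)).getD p.toNat 0 = 0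
      · rw [if_pos ⟨hpn', hz⟩, ih (p + 1) (by omega) (by omega) (by omega), hdrop]
        rw [show (p + 1).toNat = p.toNat + 1 by omega]
        simp only [firstNZ, if_pos hz]
        push_cast
        ring
      · rw [if_neg (fun h => hz h.2), hdrop]
        rw [show firstNZ ((col board (wrapIdx board.length c)).getD p.toNat 0 ::
            (col board (wrapIdx board.length c)).drop (p.toNat + 1)) = 0 from by
          unfold firstNZ; rw [if_neg hz]]
        simp
    · rw [show findNZ board board.length c (fuel + 1) p =
        (if p < (board.length : Int) ∧
            PySem.List.pyGetD (PySem.List.pyGetD board p []) c 0 = 0 then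
          findNZ board board.length c fuel (p + 1)
        else p) from rfl]
      rw [if_neg (fun h => hpn' h.1)]
      rw [List.drop_of_length_le (by rw [length_col]; omega)]
      simp [firstNZ]

theorem wrapIdx_lt (n : Nat) (i : Int) (h1 : -(n : Int) ≤ i) (h2 : i < n) :
    wrapIdx n i < n := by
  unfold wrapIdx; split <;> omega

theorem firstNZ_le (l : List Int) : firstNZ l ≤ l.length := by
  induction l with
  | nil => simp [firstNZ]
  | cons x xs ih => simp only [firstNZ]; split <;> simp <;> omega

theorem firstNZ_spec (l : List Int) :
    firstNZ l = l.length ∨ (firstNZ l < l.length ∧ l.getD (firstNZ l) 0 ≠ 0) := by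
  induction l with
  | nil => simp [firstNZ]
  | cons x xs ih =>
    simp only [firstNZ]
    split
    · rcases ih with h | ⟨h1, h2⟩
      · left; simp [h]
      · right; simpa using ⟨by omega, h2⟩
    · right; simp_all [List.getD]

theorem filter_drop_firstNZ (l : List Int) :
    (l.drop (firstNZ l)).filter (· ≠ 0) = l.filter (· ≠ 0) := by
  induction l with
  | nil => simp
  | cons x xs ih =>
    simp only [firstNZ]
    split
    · simp_all
    · simp

theorem firstNZ_lt_iff (l : List Int) :
    firstNZ l < l.length ↔ l.filter (· ≠ 0) ≠ [] := by
  constructor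
  · intro h
    rcases firstNZ_spec l with h' | ⟨h1, h2⟩
    · omega
    · rw [← filter_drop_firstNZ, List.drop_eq_getElem_cons h1, List.filter_cons]
      have h3 : l[firstNZ l] ≠ 0 := by
        simpa [List.getD, List.getElem?_eq_getElem h1] using h2
      simp [h3]
  · intro h
    by_contra h'
    have : firstNZ l = l.length := by have := firstNZ_le l; omega
    rw [← filter_drop_firstNZ, this, List.drop_length] at h
    simp at h

theorem filter_eq_cons_firstNZ (l : List Int) (h : firstNZ l < l.length) :
    l.filter (· ≠ 0) = l.getD (firstNZ l) 0 :: (l.drop (firstNZ l + 1)).filter (· ≠ 0) := by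
  have h2 := (firstNZ_spec l).resolve_left (by omega)
  rw [← filter_drop_firstNZ, List.drop_eq_getElem_cons h, List.filter_cons]
  have h3 : l[firstNZ l] ≠ 0 := by
    simpa [List.getD, List.getElem?_eq_getElem h] using h2.2
  simp [h3, List.getD, List.getElem?_eq_getElem h]

theorem getD_drop (l : List Int) (i j : Nat) (d : Int) :
    (l.drop i).getD j d = l.getD (i + j) d := by
  simp [List.getD, List.getElem?_drop]

def SimInv (board : List (List Int)) (f : List (List Int)) (q : List Int) : Prop :=
  f.length = board.length ∧ q.length = board.length ∧
  ∀ k, k < board.length →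
    0 ≤ q.getD k 0 ∧ q.getD k 0 ≤ board.length ∧
    f.getD k [] = (((col board k).drop (q.getD k 0).toNat).filter (· ≠ 0)).reverse

theorem step_sim (board : List (List Int))
    (hPre : ∀ row ∈ board, board.length ≤ row.length) (m : Int)
    (hex : 0 ≤ m - 1 ∨ ∀ row ∈ board, row.length = board.length)
    (hm1 : 1 - (board.length : Int) ≤ m) (hm2 : m ≤ board.length)
    (f : List (List Int)) (q st : List Int) (ans : Int) (hInv : SimInv board f q) :
    SimInv board (stepA (f, st, ans) m).1 (stepB board (q, st, ans) m).1 ∧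
      (stepA (f, st, ans) m).2 = (stepB board (q, st, ans) m).2 := by
  obtain ⟨hfl, hql, hI⟩ := hInv
  have hn : 0 < board.length := by omega
  have hc1 : -(board.length : Int) ≤ m - 1 := by omega
  have hc2 : m - 1 < (board.length : Int) := by omega
  set k := wrapIdx board.length (m - 1) with hkdef
  have hk : k < board.length := wrapIdx_lt _ _ hc1 hc2
  obtain ⟨hq0, hqn, hfk⟩ := hI k hk
  set q0 := q.getD k 0 with hq0def
  set L := (col board k).drop q0.toNat with hLdef
  have hLlen : L.length = board.length - q0.toNat := by
    rw [hLdef, List.length_drop, length_col]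
  have hgf : PySem.List.pyGetD f (m - 1) [] = (L.filter (· ≠ 0)).reverse := by
    rw [pyGetD_wrap f (m - 1) [] (by omega) (by omega), hfl, ← hkdef, hfk]
  have hgq : PySem.List.pyGetD q (m - 1) 0 = q0 := by
    rw [pyGetD_wrap q (m - 1) 0 (by omega) (by omega), hql, ← hkdef]
  have hfind : findNZ board board.length (m - 1) board.length
      (PySem.List.pyGetD q (m - 1) 0) = q0 + firstNZ L := by
    rw [hgq, findNZ_eq board hPre (m - 1) hex hc1 hc2 board.length q0 hq0 hqn (by omega),
      ← hkdef, ← hLdef]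
  by_cases hpn : q0 + (firstNZ L : Int) < (board.length : Int)
  · -- a block is picked
    have hlt : firstNZ L < L.length := by omega
    set cur := L.getD (firstNZ L) 0 with hcurdef
    have hfilter : L.filter (· ≠ 0) = cur :: (L.drop (firstNZ L + 1)).filter (· ≠ 0) :=
      filter_eq_cons_firstNZ L hlt
    have hflrep : PySem.List.pyGetD f (m - 1) [] =
        ((L.drop (firstNZ L + 1)).filter (· ≠ 0)).reverse ++ [cur] := by
      rw [hgf, hfilter, List.reverse_cons]
    have hp0 : (0 : Int) ≤ q0 + firstNZ L := by omega
    have hcur : PySem.List.pyGetD (PySem.List.pyGetD board (q0 + (firstNZ L : Int)) [])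
        (m - 1) 0 = cur := by
      rw [cell_eq board hPre (m - 1) _ hex hc1 hc2 hp0 hpn, ← hkdef]
      rw [show (q0 + (firstNZ L : Int)).toNat = q0.toNat + firstNZ L by omega]
      rw [← getD_drop, ← hLdef]
    have hsetf : PySem.List.pySetD f (m - 1)
        ((((L.drop (firstNZ L + 1)).filter (· ≠ 0)).reverse ++ [cur]).dropLast) =
        f.set k (((L.drop (firstNZ L + 1)).filter (· ≠ 0)).reverse) := by
      rw [pySetD_wrap f (m - 1) _ (by omega) (by omega), hfl, ← hkdef, List.dropLast_concat]
    have hsetq : PySem.List.pySetD q (m - 1) (q0 + (firstNZ L : Int) + 1) =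
        q.set k (q0 + (firstNZ L : Int) + 1) := by
      rw [pySetD_wrap q (m - 1) _ (by omega) (by omega), hql, ← hkdef]
    have hA : stepA (f, st, ans) m =
        (f.set k (((L.drop (firstNZ L + 1)).filter (· ≠ 0)).reverse),
         if st ≠ [] ∧ PySem.List.pyGetD st (-1) 0 = cur then (st.dropLast, ans + 2)
         else (st ++ [cur], ans)) := by
      simp only [stepA, hflrep]
      rw [if_pos (by simp), PySem.List.pyGetD_neg_one_append_singleton, hsetf]
      split <;> rfl
    have hB : stepB board (q, st, ans) m =
        (q.set k (q0 + (firstNZ L : Int) + 1),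
         if st ≠ [] ∧ PySem.List.pyGetD st (-1) 0 = cur then (st.dropLast, ans + 2)
         else (st ++ [cur], ans)) := by
      simp only [stepB, hfind]
      rw [if_pos hpn, hcur, hsetq]
      split <;> rfl
    rw [hA, hB]
    dsimp only
    refine ⟨⟨by simp [hfl], by simp [hql], ?_⟩, rfl⟩
    intro k' hk'
    by_cases hkk : k' = k
    · rw [hkk]
      have hqset : (q.set k (q0 + (firstNZ L : Int) + 1)).getD k 0 =
          q0 + (firstNZ L : Int) + 1 := by
        simp [List.getD, show k < q.length by omega]
      have hfset : (f.set k (((L.drop (firstNZ L + 1)).filter (· ≠ 0)).reverse)).getD k [] =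
          ((L.drop (firstNZ L + 1)).filter (· ≠ 0)).reverse := by
        simp [List.getD, show k < f.length by omega]
      refine ⟨by rw [hqset]; omega, by rw [hqset]; omega, ?_⟩
      rw [hqset, hfset, hLdef, List.drop_drop]
      congr 3
      omega
    · have hqset : (q.set k (q0 + (firstNZ L : Int) + 1)).getD k' 0 = q.getD k' 0 := by
        simp [List.getD, List.getElem?_set_ne (by omega : k ≠ k')]
      have hfset : (f.set k (((L.drop (firstNZ L + 1)).filter (· ≠ 0)).reverse)).getD k' [] =
          f.getD k' [] := by
        simp [List.getD, List.getElem?_set_ne (by omega : k ≠ k')]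
      rw [hqset, hfset]
      exact hI k' hk'
  · -- exhausted column: both sides skip
    have hemp : PySem.List.pyGetD f (m - 1) [] = [] := by
      rw [hgf]
      have : firstNZ L = L.length := by have := firstNZ_le L; omega
      have hfe : L.filter (· ≠ 0) = [] := by
        by_contra hne
        have := (firstNZ_lt_iff L).2 hne
        omega
      rw [hfe, List.reverse_nil]
    have hA : stepA (f, st, ans) m = (f, st, ans) := by
      simp only [stepA, hemp]
      rw [if_neg (by simp)]
    have hB : stepB board (q, st, ans) m = (q, st, ans) := by
      simp only [stepB, hfind]
      rw [if_neg hpn]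
    rw [hA, hB]
    exact ⟨⟨hfl, hql, hI⟩, rfl⟩

theorem loop_sim (board : List (List Int))
    (hPre : ∀ row ∈ board, board.length ≤ row.length) :
    ∀ (moves : List Int), (∀ m ∈ moves, 1 - (board.length : Int) ≤ m ∧ m ≤ board.length) →
      ((∀ row ∈ board, row.length = board.length) ∨ (∀ m ∈ moves, 1 ≤ m)) →
      ∀ (f : List (List Int)) (q st : List Int) (ans : Int), SimInv board f q →
      (moves.foldl stepA (f, st, ans)).2 = (moves.foldl (stepB board) (q, st, ans)).2 := by
  intro moves
  induction moves with
  | nil => intro _ _ f q st ans _; rfl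
  | cons m ms ih =>
    intro hmv hex f q st ans hInv
    have hm := hmv m (by simp)
    have hexm : 0 ≤ m - 1 ∨ ∀ row ∈ board, row.length = board.length := by
      rcases hex with h | h
      · right; exact h
      · left; have := h m (by simp); omega
    obtain ⟨hI', heq⟩ := step_sim board hPre m hexm hm.1 hm.2 f q st ans hInv
    simp only [List.foldl_cons]
    have hA : stepA (f, st, ans) m =
        ((stepA (f, st, ans) m).1, (stepA (f, st, ans) m).2) := rfl
    have hB : stepB board (q, st, ans) m =
        ((stepB board (q, st, ans) m).1, (stepB board (q, st, ans) m).2) := rfl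
    rw [hA, hB, ← heq]
    obtain ⟨st', ans'⟩ := (stepA (f, st, ans) m).2
    exact ih (fun x hx => hmv x (by simp [hx]))
      (by rcases hex with h | h
          · exact Or.inl h
          · exact Or.inr fun x hx => h x (by simp [hx])) _ _ _ _ hI'

-- ===== VERDICT (by name: the statement is the Claim_ definition above) =====
theorem solution_spec : Claim_equal_solution := by
  intro board moves _ hPre
  unfold Spec_solution solution solution_alt
  obtain ⟨hsq, hmv, hex⟩ := hPre
  apply congrArg (fun p : List Int × Int => p.2)
  apply loop_sim board hsq moves hmv hex
  obtain ⟨hlen, hcols⟩ := buildField_spec board hsq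
  refine ⟨hlen, by simp, ?_⟩
  intro k hk
  have hq : (List.replicate board.length (0 : Int)).getD k 0 = 0 := by
    simp [List.getD]
  rw [hq]
  simpa using hcols k hk
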